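-- pv_equiv track=rewrite | github.com/Taoge123/OptimizedLeetcode | LeetcodeNew/python/LC_955.py | minDeletionSize
-- ===== SOURCE A (Python) =====
-- import copy
--
-- def minDeletionSize(A):
--     m, n, res = len(A), len(A[0]), 0
--     compare = [True] * m
--
--     for j in range(n):
--         new_compare = copy.copy(compare)
--         for i in range(1, m):
--             if compare[i]:
--                 if A[i][j] < A[i - 1][j]:
--                     res += 1
--                     compare = new_compare
--                     break
--
--                 elif A[i][j] > A[i - 1][j]:
--                     compare[i] = False
--
--     return res
-- ===== SOURCE B (Python) =====
-- def minDeletionSize(A):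
--     m, n = len(A), len(A[0])
--     res = 0
--     cur = [""] * m
--     for j in range(n):
--         cand = [cur[i] + A[i][j] for i in range(m)]
--         if all(cand[i - 1] <= cand[i] for i in range(1, m)):
--             cur = cand
--         else:
--             res += 1
--     return res
-- ===== Notes on version B (the rewrite author's own statement) =====
-- stated objective: alternative
-- what changed: Replaced A's boolean tie-flag array with mutate-and-rollback by a different data structure: B keeps the kept-column prefix string of every row and keeps a column exactly when the candidate prefixes are lexicographically sorted, so no tie bookkeeping, no copy/rollback and no break are needed.
-- outside the precondition, e.g. on minDeletionSize(['cb', 'ba', '']): A returns 2, B raises IndexError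
import Mathlib
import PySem

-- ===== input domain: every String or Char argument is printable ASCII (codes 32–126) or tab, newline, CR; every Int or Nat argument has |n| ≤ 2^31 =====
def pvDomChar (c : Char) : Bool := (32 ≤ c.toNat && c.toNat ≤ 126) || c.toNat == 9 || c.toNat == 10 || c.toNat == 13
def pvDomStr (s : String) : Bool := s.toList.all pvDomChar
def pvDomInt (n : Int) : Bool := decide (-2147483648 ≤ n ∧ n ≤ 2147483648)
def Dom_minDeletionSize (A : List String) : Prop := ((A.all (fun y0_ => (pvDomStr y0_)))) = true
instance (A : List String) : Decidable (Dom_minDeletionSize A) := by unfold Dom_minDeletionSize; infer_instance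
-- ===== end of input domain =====

-- B keeps the kept-column prefix of every row and tests lexicographic sortedness of candidate prefixes, instead of A's tie-flag array with copy/mutate/rollback; alternative data structure, same return value.


-- ===== PORT A =====
-- A[i][j] as Python reads it (in range whenever Pre_ holds; the default is never reached there)
def pvCh (A : List String) (i j : Nat) : Char :=
  (PySem.Str.pyGet? ((PySem.List.pyGet? A (i : Int)).getD "") (j : Int)).getD ' '

-- A's inner `for i in range(1, m)` loop: mutate `compare`, on '<' restore `new_compare`, bump res and break
def pvA_inner (A : List String) (j : Nat) (newCompare : List Bool) :
    List Nat → List Bool → Int → List Bool × Int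
  | [], compare, res => (compare, res)
  | i :: rest, compare, res =>
    if compare.getD i false then
      if pvCh A i j < pvCh A (i - 1) j then (newCompare, res + 1)
      else if pvCh A i j > pvCh A (i - 1) j then
        pvA_inner A j newCompare rest (compare.set i false) res
      else pvA_inner A j newCompare rest compare res
    else pvA_inner A j newCompare rest compare res

def pvColA (A : List String) (m : Nat) (st : List Bool × Int) (j : Nat) : List Bool × Int :=
  let newCompare := st.1          -- copy.copy(compare)
  pvA_inner A j newCompare (List.range' 1 (m - 1)) st.1 st.2

def minDeletionSize (A : List String) : Int :=
  let m := A.length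
  let n := (A.head?.getD "").length   -- len(A[0]); Python raises IndexError on [], excluded by Pre_
  ((List.range n).foldl (pvColA A m) (List.replicate m true, 0)).2

-- ===== PORT B =====
-- Python's '<=' on strings: code-point lexicographic order, exact on lists of chars
def pvLe : List Char → List Char → Bool
  | [], _ => true
  | _ :: _, [] => false
  | a :: as_, b :: bs => if a < b then true else if b < a then false else pvLe as_ bs

-- one column of B: build the candidate prefixes, keep them iff they are sorted
def pvColB (A : List String) (m : Nat) (st : List (List Char) × Int) (j : Nat) :
    List (List Char) × Int :=
  let cand := (List.range m).map (fun i => st.1.getD i [] ++ [pvCh A i j])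
  if (List.range' 1 (m - 1)).all (fun i => pvLe (cand.getD (i - 1) []) (cand.getD i [])) then
    (cand, st.2)
  else (st.1, st.2 + 1)

def minDeletionSize_alt (A : List String) : Int :=
  let m := A.length
  let n := (A.head?.getD "").length
  ((List.range n).foldl (pvColB A m) (List.replicate m [], 0)).2

-- ===== PRECONDITION & SPEC =====
-- Pre_ excludes the empty list (A[0] raises IndexError) and ragged inputs whose strings are
-- shorter than the first (there A[i][j] may raise IndexError depending on how the ties evolve).
def Pre_minDeletionSize (A : List String) : Prop :=
  A ≠ [] ∧ ∀ s ∈ A, (A.head?.getD "").length ≤ s.length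
instance (A : List String) : Decidable (Pre_minDeletionSize A) := by
  unfold Pre_minDeletionSize; infer_instance

def pvWitness_minDeletionSize : List String := ["cba", "daf", "ghi"]

def Spec_minDeletionSize (A : List String) (out : Int) : Prop := out = minDeletionSize_alt A
instance (A : List String) (out : Int) : Decidable (Spec_minDeletionSize A out) := by unfold Spec_minDeletionSize; infer_instance

-- ===== CLAIM (what is proved, stated in full; the proofs are below) =====
def Claim_equal_minDeletionSize : Prop := ∀ (A : List String), Dom_minDeletionSize A → Pre_minDeletionSize A → Spec_minDeletionSize A (minDeletionSize A)

-- ===== LEMMAS AND PROOFS =====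

-- proof-internal characterisation of A's inner loop: one step of a clear pass
def pvStep (A : List String) (j : Nat) (tied : List Bool) (i : Nat) : List Bool :=
  if tied.getD i false && decide (pvCh A i j > pvCh A (i - 1) j) then tied.set i false else tied

-- A's rollback inner loop equals check-then-commit, for any duplicate-free index list L
lemma pv_inner_eq (A : List String) (j : Nat) (tied0 : List Bool) :
    ∀ (L : List Nat), L.Nodup →
    ∀ (tied : List Bool) (res : Int),
    (∀ i ∈ L, tied.getD i false = tied0.getD i false) →
    pvA_inner A j tied0 L tied res =
      (if L.any (fun i => tied0.getD i false && decide (pvCh A i j < pvCh A (i - 1) j)) then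
        (tied0, res + 1)
      else (L.foldl (pvStep A j) tied, res)) := by
  intro L
  induction L with
  | nil => intro _ tied res _; simp [pvA_inner]
  | cons i rest ih =>
    intro hnd tied res hread
    have hi : tied.getD i false = tied0.getD i false := hread i (by simp)
    have hnotmem : i ∉ rest := (List.nodup_cons.mp hnd).1
    have hndr : rest.Nodup := (List.nodup_cons.mp hnd).2
    have hread' : ∀ i' ∈ rest, tied.getD i' false = tied0.getD i' false :=
      fun i' hi' => hread i' (by simp [hi'])
    simp only [pvA_inner]
    rw [hi]
    by_cases h0 : tied0.getD i false = true
    · rw [if_pos h0]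
      by_cases hlt : pvCh A i j < pvCh A (i - 1) j
      · have hany : ((i :: rest).any fun i => tied0.getD i false && decide (pvCh A i j < pvCh A (i - 1) j)) = true := by
          simp only [List.any_cons, h0, hlt, decide_true, Bool.and_true, Bool.true_or]
        rw [if_pos hlt, if_pos hany]
      · have hfi : (tied0.getD i false && decide (pvCh A i j < pvCh A (i - 1) j)) = false := by
          simp [hlt]
        rw [if_neg hlt, List.any_cons, hfi, Bool.false_or, List.foldl_cons]
        by_cases hgt : pvCh A i j > pvCh A (i - 1) j
        · have hread'' : ∀ i' ∈ rest, (tied.set i false).getD i' false = tied0.getD i' false := by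
            intro i' hi'
            have hne : i' ≠ i := fun h => hnotmem (h ▸ hi')
            rw [← hread' i' hi']
            simp [List.getD, List.getElem?_set_ne (Ne.symm hne)]
          have hstep : pvStep A j tied i = tied.set i false := by
            simp only [pvStep]; rw [hi, h0]; simp [hgt]
          rw [if_pos hgt, hstep, ih hndr (tied.set i false) res hread'']
        · have hstep : pvStep A j tied i = tied := by
            simp [pvStep, hgt]
          rw [if_neg hgt, hstep, ih hndr tied res hread']
    · have h0' : tied0.getD i false = false := by
        cases h : tied0.getD i false with
        | true => exact absurd h h0
        | false => rfl
      have hfi : (tied0.getD i false && decide (pvCh A i j < pvCh A (i - 1) j)) = false := by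
        rw [h0']; simp
      have hstep : pvStep A j tied i = tied := by
        simp only [pvStep]; rw [hi, h0']; simp
      rw [h0', if_neg (by simp : ¬ (false = true)), List.any_cons, hfi, Bool.false_or,
        List.foldl_cons, hstep, ih hndr tied res hread']

-- the clear pass leaves indices outside L untouched
lemma pv_foldl_step_notmem (A : List String) (j : Nat) :
    ∀ (L : List Nat) (t : List Bool) (k : Nat), k ∉ L →
    (L.foldl (pvStep A j) t).getD k false = t.getD k false := by
  intro L
  induction L with
  | nil => intro t k _; rfl
  | cons i rest ih =>
    intro t k hk
    have hki : k ≠ i := fun h => hk (by simp [h])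
    have hkr : k ∉ rest := fun h => hk (by simp [h])
    rw [List.foldl_cons, ih _ _ hkr]
    unfold pvStep
    split
    · simp [List.getD, List.getElem?_set_ne (Ne.symm hki)]
    · rfl

-- getD of one clear step at its own index
lemma pvStep_getD_self (A : List String) (j : Nat) (t : List Bool) (k : Nat) :
    (pvStep A j t k).getD k false = (t.getD k false && !decide (pvCh A k j > pvCh A (k - 1) j)) := by
  unfold pvStep
  by_cases ht : t.getD k false = true
  · have hl : k < t.length := by
      by_contra hge
      have hnone : t.getD k false = false := by
        unfold List.getD; rw [List.getElem?_eq_none (by omega)]; rfl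
      rw [hnone] at ht; exact Bool.false_ne_true ht
    by_cases hgt : pvCh A k j > pvCh A (k - 1) j
    · rw [if_pos (by rw [ht]; simp [hgt]), ht]
      simp [List.getD, hl, hgt]
    · rw [if_neg (by simp [hgt]), ht]; simp [hgt]
  · rw [Bool.not_eq_true] at ht
    rw [if_neg (by rw [ht]; simp), ht]; simp

-- value at an index of L after the clear pass
lemma pv_foldl_step_mem (A : List String) (j : Nat) :
    ∀ (L : List Nat) (t : List Bool) (k : Nat), L.Nodup → k ∈ L →
    (L.foldl (pvStep A j) t).getD k false
      = (t.getD k false && !decide (pvCh A k j > pvCh A (k - 1) j)) := by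
  intro L
  induction L with
  | nil => intro t k _ hk; exact absurd hk (by simp)
  | cons i rest ih =>
    intro t k hnd hk
    have hir : i ∉ rest := (List.nodup_cons.mp hnd).1
    have hndr : rest.Nodup := (List.nodup_cons.mp hnd).2
    rw [List.foldl_cons]
    rcases List.mem_cons.mp hk with hk | hk
    · subst hk
      rw [pv_foldl_step_notmem A j rest _ k hir, pvStep_getD_self]
    · rw [ih _ _ hndr hk]
      unfold pvStep
      split
      · have hki : k ≠ i := fun h => hir (h ▸ hk)
        simp [List.getD, List.getElem?_set_ne (Ne.symm hki)]
      · rfl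

lemma pv_foldl_step_length (A : List String) (j : Nat) :
    ∀ (L : List Nat) (t : List Bool), (L.foldl (pvStep A j) t).length = t.length := by
  intro L
  induction L with
  | nil => intro t; rfl
  | cons i rest ih =>
    intro t
    rw [List.foldl_cons, ih]
    unfold pvStep
    split
    · exact List.length_set
    · rfl

-- lexicographic comparison of equal-length lists extended by one char
lemma pvLe_append (c d : Char) :
    ∀ (x y : List Char), x.length = y.length →
    pvLe (x ++ [c]) (y ++ [d]) = (if x = y then !decide (d < c) else pvLe x y) := by
  intro x
  induction x with
  | nil =>
    intro y hy
    have : y = [] := List.eq_nil_of_length_eq_zero hy.symm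
    subst this
    simp only [List.nil_append, pvLe]
    by_cases h1 : c < d
    · have h2 : ¬ d < c := fun h => absurd (lt_trans h1 h) (lt_irrefl c)
      simp [h1, h2]
    · by_cases h2 : d < c
      · simp [h1, h2]
      · simp [h1, h2]
  | cons a as ih =>
    intro y hy
    cases y with
    | nil => exact absurd hy (by simp)
    | cons b bs =>
      have hlen : as.length = bs.length := by simpa using hy
      simp only [List.cons_append, pvLe]
      by_cases h1 : a < b
      · have hne : (a :: as) ≠ (b :: bs) := by
          intro h; cases h; exact lt_irrefl a h1
        simp [h1, hne]
      · by_cases h2 : b < a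
        · have hne : (a :: as) ≠ (b :: bs) := by
            intro h; cases h; exact lt_irrefl a h2
          simp [h1, h2, hne]
        · have hab : a = b := le_antisymm (not_lt.mp h2) (not_lt.mp h1)
          subst hab
          have hcons : ((a :: as) = (a :: bs)) ↔ (as = bs) := by simp
          rw [if_neg h1, if_neg h2, ih bs hlen]
          by_cases h3 : as = bs
          · simp [h3]
          · have : (a :: as) ≠ (a :: bs) := fun h => h3 (by injection h)
            simp [h3, this]

-- the simulation relation between A's tie flags and B's prefixes
def pvR (_A : List String) (m : Nat) (compare : List Bool) (cur : List (List Char)) : Prop :=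
  compare.length = m ∧ cur.length = m ∧
  (∀ i ∈ List.range' 1 (m - 1),
      compare.getD i false = decide (cur.getD (i - 1) [] = cur.getD i [])) ∧
  (∀ i ∈ List.range' 1 (m - 1), pvLe (cur.getD (i - 1) []) (cur.getD i []) = true) ∧
  (∀ i ∈ List.range' 1 (m - 1), (cur.getD (i - 1) []).length = (cur.getD i []).length)

-- one column preserves the relation and produces the same deletion count
lemma pv_col_sim (A : List String) (m : Nat) (j : Nat)
    (compare : List Bool) (cur : List (List Char)) (res : Int)
    (h : pvR A m compare cur) :
    (pvColA A m (compare, res) j).2 = (pvColB A m (cur, res) j).2 ∧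
    pvR A m (pvColA A m (compare, res) j).1 (pvColB A m (cur, res) j).1 := by
  obtain ⟨hlen, hclen, htie, hsort, hlens⟩ := h
  have hbnd : ∀ i ∈ List.range' 1 (m - 1), 1 ≤ i ∧ i < m := by
    intro i hi
    obtain ⟨k, hk, rfl⟩ := List.mem_range'.mp hi
    omega
  have hcand : ∀ i0, i0 < m →
      ((List.range m).map (fun i => cur.getD i [] ++ [pvCh A i j])).getD i0 []
        = cur.getD i0 [] ++ [pvCh A i0 j] := by
    intro i0 h0
    simp [List.getD, h0]
  have hA : pvColA A m (compare, res) j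
      = pvA_inner A j compare (List.range' 1 (m - 1)) compare res := rfl
  have hB : pvColB A m (cur, res) j
      = (if (List.range' 1 (m - 1)).all
            (fun i => pvLe ((((List.range m).map (fun i => cur.getD i [] ++ [pvCh A i j]))).getD (i - 1) [])
                            ((((List.range m).map (fun i => cur.getD i [] ++ [pvCh A i j]))).getD i []))
          then ((List.range m).map (fun i => cur.getD i [] ++ [pvCh A i j]), res)
          else (cur, res + 1)) := rfl
  rw [hA, hB,
    pv_inner_eq A j compare (List.range' 1 (m - 1)) List.nodup_range' compare res (fun _ _ => rfl)]
  -- pointwise: B's pair check is the negation of A's delete test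
  have hpair : ∀ i ∈ List.range' 1 (m - 1),
      pvLe ((((List.range m).map (fun i => cur.getD i [] ++ [pvCh A i j]))).getD (i - 1) [])
           ((((List.range m).map (fun i => cur.getD i [] ++ [pvCh A i j]))).getD i [])
        = !(compare.getD i false && decide (pvCh A i j < pvCh A (i - 1) j)) := by
    intro i hi
    obtain ⟨h1, h2⟩ := hbnd i hi
    rw [hcand i h2, hcand (i - 1) (by omega), pvLe_append _ _ _ _ (hlens i hi)]
    by_cases hcur : cur.getD (i - 1) [] = cur.getD i []
    · rw [if_pos hcur, htie i hi, hcur]; simp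
    · rw [if_neg hcur, htie i hi, hsort i hi]
      simp only [decide_eq_false hcur, Bool.false_and, Bool.not_false]
  by_cases hany : (List.range' 1 (m - 1)).any
      (fun i => compare.getD i false && decide (pvCh A i j < pvCh A (i - 1) j)) = true
  · -- column deleted by both; states unchanged
    obtain ⟨i, hi, hpa⟩ := List.any_eq_true.mp hany
    have hnall : ¬ ((List.range' 1 (m - 1)).all
        (fun i => pvLe ((((List.range m).map (fun i => cur.getD i [] ++ [pvCh A i j]))).getD (i - 1) [])
                        ((((List.range m).map (fun i => cur.getD i [] ++ [pvCh A i j]))).getD i [])) = true) := by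
      intro hall
      have := List.all_eq_true.mp hall i hi
      rw [hpair i hi, hpa] at this
      exact Bool.false_ne_true this
    rw [if_pos hany, if_neg hnall]
    exact ⟨rfl, hlen, hclen, htie, hsort, hlens⟩
  · -- column kept by both
    have hno : ∀ i ∈ List.range' 1 (m - 1),
        (compare.getD i false && decide (pvCh A i j < pvCh A (i - 1) j)) = false := by
      intro i hi
      rcases Bool.eq_false_or_eq_true (compare.getD i false && decide (pvCh A i j < pvCh A (i - 1) j)) with h | h
      · exact absurd (List.any_eq_true.mpr ⟨i, hi, h⟩) hany
      · exact h
    have hall : (List.range' 1 (m - 1)).all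
        (fun i => pvLe ((((List.range m).map (fun i => cur.getD i [] ++ [pvCh A i j]))).getD (i - 1) [])
                        ((((List.range m).map (fun i => cur.getD i [] ++ [pvCh A i j]))).getD i [])) = true := by
      rw [List.all_eq_true]
      intro i hi
      rw [hpair i hi, hno i hi]; rfl
    rw [if_neg hany, if_pos hall]
    refine ⟨rfl, ?_, ?_, ?_, ?_, ?_⟩
    · rw [pv_foldl_step_length]; exact hlen
    · simp
    · -- new tie flags describe equality of the new prefixes
      intro i hi
      obtain ⟨h1, h2⟩ := hbnd i hi
      rw [pv_foldl_step_mem A j _ _ _ List.nodup_range' hi, hcand i h2, hcand (i - 1) (by omega)]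
      have hlen1 : [pvCh A (i - 1) j].length = [pvCh A i j].length := rfl
      by_cases hcur : cur.getD (i - 1) [] = cur.getD i []
      · have hc : compare.getD i false = true := by rw [htie i hi, hcur]; simp
        have hnlt : ¬ pvCh A i j < pvCh A (i - 1) j := by
          have := hno i hi
          rw [hc] at this
          simpa using this
        rw [hc]
        by_cases hgt : pvCh A (i - 1) j < pvCh A i j
        · have hne : cur.getD (i - 1) [] ++ [pvCh A (i - 1) j] ≠ cur.getD i [] ++ [pvCh A i j] := by
            intro heq
            have := (List.append_inj' heq hlen1).2
            have : pvCh A (i - 1) j = pvCh A i j := by injection this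
            exact absurd (this ▸ hgt) (lt_irrefl _)
          simp only [hgt, decide_true, Bool.not_true, Bool.and_false]
          exact (decide_eq_false hne).symm
        · have heqc : pvCh A (i - 1) j = pvCh A i j := le_antisymm (not_lt.mp hnlt) (not_lt.mp hgt)
          simp only [hgt, decide_false, Bool.not_false, Bool.and_true]
          exact (decide_eq_true (by rw [hcur, heqc])).symm
      · have hc : compare.getD i false = false := by rw [htie i hi]; exact decide_eq_false hcur
        have hne : cur.getD (i - 1) [] ++ [pvCh A (i - 1) j] ≠ cur.getD i [] ++ [pvCh A i j] := by
          intro heq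
          exact hcur (List.append_inj' heq hlen1).1
        rw [hc]
        simp only [Bool.false_and]
        exact (decide_eq_false hne).symm
    · -- new prefixes are sorted
      intro i hi
      have := List.all_eq_true.mp hall i hi
      simpa using this
    · -- new prefixes keep equal lengths
      intro i hi
      obtain ⟨h1, h2⟩ := hbnd i hi
      rw [hcand i h2, hcand (i - 1) (by omega)]
      simp only [List.length_append]
      exact congrArg (· + 1) (hlens i hi)

lemma pv_chain (A : List String) (m : Nat) :
    ∀ (js : List Nat) (compare : List Bool) (cur : List (List Char)) (res : Int),
    pvR A m compare cur →
    (js.foldl (pvColA A m) (compare, res)).2 = (js.foldl (pvColB A m) (cur, res)).2 := by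
  intro js
  induction js with
  | nil => intro _ _ _ _; rfl
  | cons j rest ih =>
    intro compare cur res h
    have hcol := pv_col_sim A m j compare cur res h
    simp only [List.foldl_cons]
    have hA : pvColA A m (compare, res) j
        = ((pvColA A m (compare, res) j).1, (pvColA A m (compare, res) j).2) := rfl
    have hB : pvColB A m (cur, res) j
        = ((pvColB A m (cur, res) j).1, (pvColB A m (cur, res) j).2) := rfl
    rw [hA, hB, ← hcol.1]
    exact ih _ _ _ hcol.2

lemma pvR_init (A : List String) (m : Nat) :
    pvR A m (List.replicate m true) (List.replicate m []) := by
  refine ⟨List.length_replicate, List.length_replicate, ?_, ?_, ?_⟩ <;>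
  · intro i hi
    have h2 : i < m := by
      rcases List.mem_range'.mp hi with ⟨k, hk, rfl⟩; omega
    have h1 : i - 1 < m := by omega
    simp [List.getD, h1, h2, pvLe]

-- ===== VERDICT (by name: the statement is the Claim_ definition above) =====
theorem minDeletionSize_spec : Claim_equal_minDeletionSize := by
  intro A _ _
  simp only [Spec_minDeletionSize, minDeletionSize, minDeletionSize_alt]
  exact pv_chain A A.length (List.range (A.head?.getD "").length) _ _ 0 (pvR_init A A.length)
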